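-- pv_equiv track=rewrite | github.com/guilopgar/ner-linking-demo | server/ner/src/utils/ner/pre_process.py | fragment_greedy_data
-- ===== SOURCE A (Python) =====
-- from typing import Iterable, List, Dict, Tuple, Optional, Union
--
-- def fragment_greedy_data(
--         arr_subtoken: List[List[str]],
--         arr_start_end: List[List[Tuple[int, int]]],
--         arr_labels: List[List[List[str]]],
--         arr_word_id: List[List[int]], max_seq_len: int
-- ) -> Tuple[
--     List[List[str]], List[List[Tuple[int, int]]],
--     List[List[List[str]]], List[List[int]]
-- ]:
--     """
--     Implementation of the multiple-sentence fine-tuning approach developed in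
--     http://ceur-ws.org/Vol-2664/cantemist_paper15.pdf, which consists in
--     generating text fragments containing the maximum number of adjacent
--     sequences, such that the length of each fragment is <= max_seq_len.
--     """
--     frag_subtoken, frag_start_end, frag_word_id = [[]], [[]], [[]]
--     frag_labels = [[[]] for lab_i in range(len(arr_labels))]
--     i = 0
--     while i < len(arr_subtoken):
--         assert len(arr_subtoken[i]) <= max_seq_len
--         if len(frag_subtoken[-1]) + len(arr_subtoken[i]) > max_seq_len:
--             # Fragment is full, so create a new empty fragment
--             frag_subtoken.append([])
--             frag_start_end.append([])
--             frag_word_id.append([])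
--             for lab_i in range(len(arr_labels)):
--                 frag_labels[lab_i].append([])
--
--         frag_subtoken[-1].extend(arr_subtoken[i])
--         frag_start_end[-1].extend(arr_start_end[i])
--         frag_word_id[-1].extend(arr_word_id[i])
--         for lab_i in range(len(arr_labels)):
--             frag_labels[lab_i][-1].extend(arr_labels[lab_i][i])
--
--         i += 1
--
--     return frag_subtoken, frag_start_end, frag_labels, frag_word_id
-- ===== SOURCE B (Python) =====
-- from typing import List, Tuple
--
--
-- def fragment_greedy_data(
--         arr_subtoken: List[List[str]],
--         arr_start_end: List[List[Tuple[int, int]]],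
--         arr_labels: List[List[List[str]]],
--         arr_word_id: List[List[int]], max_seq_len: int
-- ) -> Tuple[
--     List[List[str]], List[List[Tuple[int, int]]],
--     List[List[List[str]]], List[List[int]]
-- ]:
--     # Phase 1: pack sequence INDICES into groups by length only.
--     groups = []
--     cur_group = []
--     cur_len = 0
--     for i, seq in enumerate(arr_subtoken):
--         length = len(seq)
--         assert length <= max_seq_len
--         if cur_len + length > max_seq_len:
--             groups.append(cur_group)
--             cur_group = []
--             cur_len = 0
--         cur_group.append(i)
--         cur_len += length
--     groups.append(cur_group)
--
--     # Phase 2: assemble each output by concatenating the grouped slices.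
--     frag_subtoken = [[t for i in g for t in arr_subtoken[i]] for g in groups]
--     frag_start_end = [[t for i in g for t in arr_start_end[i]] for g in groups]
--     frag_word_id = [[t for i in g for t in arr_word_id[i]] for g in groups]
--     frag_labels = [[[t for i in g for t in labs[i]] for g in groups]
--                    for labs in arr_labels]
--     return frag_subtoken, frag_start_end, frag_labels, frag_word_id
-- ===== Notes on version B (the rewrite author's own statement) =====
-- stated objective: alternative
-- what changed: A interleaves packing and assembly in one while-loop that mutates the last fragment of every output list per sequence; B first computes the index groups from the sequence lengths alone, then assembles each output by concatenating the grouped slices in a second phase.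
import Mathlib
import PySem

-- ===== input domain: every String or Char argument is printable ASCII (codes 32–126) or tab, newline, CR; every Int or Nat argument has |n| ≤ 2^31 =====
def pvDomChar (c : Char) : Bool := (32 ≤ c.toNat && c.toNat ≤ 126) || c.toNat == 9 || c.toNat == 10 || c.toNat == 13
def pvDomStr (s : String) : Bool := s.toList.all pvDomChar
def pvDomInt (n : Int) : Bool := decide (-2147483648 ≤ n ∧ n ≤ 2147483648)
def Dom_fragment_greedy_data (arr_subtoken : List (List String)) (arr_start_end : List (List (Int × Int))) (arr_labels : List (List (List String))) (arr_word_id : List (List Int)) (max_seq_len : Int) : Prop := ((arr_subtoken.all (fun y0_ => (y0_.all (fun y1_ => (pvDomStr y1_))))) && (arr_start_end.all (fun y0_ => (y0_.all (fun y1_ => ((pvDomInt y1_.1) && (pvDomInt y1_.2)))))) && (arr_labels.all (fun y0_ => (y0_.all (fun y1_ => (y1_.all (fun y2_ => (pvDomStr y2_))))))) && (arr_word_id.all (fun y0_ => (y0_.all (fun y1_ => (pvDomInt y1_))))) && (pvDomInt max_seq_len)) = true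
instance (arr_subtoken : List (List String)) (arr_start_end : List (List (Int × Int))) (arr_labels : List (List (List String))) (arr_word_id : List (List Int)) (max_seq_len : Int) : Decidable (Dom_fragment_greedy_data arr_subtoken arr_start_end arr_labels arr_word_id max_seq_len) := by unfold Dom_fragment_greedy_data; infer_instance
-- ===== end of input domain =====

-- B replaces A's single loop (which grows the last fragment of every output in lockstep)
-- by a length-only packing pass that yields index groups, followed by a separate assembly
-- phase concatenating the grouped slices ('alternative': same cost, different decomposition).

-- ===== PORT A =====
-- 'frag[-1].extend(ys)' on a nonempty list of lists
def pvExtendLast {α : Type} (xss : List (List α)) (ys : List α) : List (List α) :=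
  match xss with
  | [] => []
  | [x] => [x ++ ys]
  | x :: y :: rest => x :: pvExtendLast (y :: rest) ys

-- 'len(frag[-1])' on a nonempty list of lists
def pvLastLen {α : Type} (xss : List (List α)) : Nat :=
  match xss with
  | [] => 0
  | [x] => x.length
  | _ :: y :: rest => pvLastLen (y :: rest)

def fragment_greedy_data (arr_subtoken : List (List String)) (arr_start_end : List (List (Int × Int))) (arr_labels : List (List (List String))) (arr_word_id : List (List Int)) (max_seq_len : Int) : List (List String) × (List (List (Int × Int))) × List (List (List String)) × List (List Int) :=
  -- while i < len(arr_subtoken): mutate the last fragment of each accumulator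
  (List.range arr_subtoken.length).foldl
    (fun st i =>
      let cur := arr_subtoken.getD i []
      let st :=
        if (pvLastLen st.1 : Int) + (cur.length : Int) > max_seq_len then
          (st.1 ++ [[]], st.2.1 ++ [[]], st.2.2.1.map (fun fl => fl ++ [[]]), st.2.2.2 ++ [[]])
        else st
      (pvExtendLast st.1 cur,
       pvExtendLast st.2.1 (arr_start_end.getD i []),
       List.zipWith (fun fl d => pvExtendLast fl (d.getD i [])) st.2.2.1 arr_labels,
       pvExtendLast st.2.2.2 (arr_word_id.getD i [])))
    ([[]], [[]], arr_labels.map (fun _ => [[]]), [[]])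

-- ===== PORT B =====
-- phase 1 of Source B: pack sequence indices into groups, driven only by the lengths
def pvPackGroups (lens : List Int) (max_seq_len : Int) (i : Nat) (curLen : Int) (curRev : List Nat) : List (List Nat) :=
  match lens with
  | [] => [curRev.reverse]
  | L :: rest =>
    if curLen + L > max_seq_len then curRev.reverse :: pvPackGroups rest max_seq_len (i + 1) L [i]
    else pvPackGroups rest max_seq_len (i + 1) (curLen + L) (i :: curRev)

-- phase 2 of Source B: '[t for i in g for t in data[i]]'
def pvPackWith {α : Type} (data : List (List α)) (g : List Nat) : List α :=
  g.flatMap (fun i => data.getD i [])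

def fragment_greedy_data_alt (arr_subtoken : List (List String)) (arr_start_end : List (List (Int × Int))) (arr_labels : List (List (List String))) (arr_word_id : List (List Int)) (max_seq_len : Int) : List (List String) × (List (List (Int × Int))) × List (List (List String)) × List (List Int) :=
  let groups := pvPackGroups (arr_subtoken.map (fun s => (s.length : Int))) max_seq_len 0 0 []
  (groups.map (pvPackWith arr_subtoken),
   groups.map (pvPackWith arr_start_end),
   arr_labels.map (fun d => groups.map (pvPackWith d)),
   groups.map (pvPackWith arr_word_id))

-- ===== PRECONDITION & SPEC =====
-- Pre_ excludes exactly the inputs where the Python A raises: a sequence longer than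
-- max_seq_len (AssertionError) or a companion list shorter than arr_subtoken (IndexError).
def Pre_fragment_greedy_data (arr_subtoken : List (List String)) (arr_start_end : List (List (Int × Int))) (arr_labels : List (List (List String))) (arr_word_id : List (List Int)) (max_seq_len : Int) : Prop :=
  (∀ s ∈ arr_subtoken, (s.length : Int) ≤ max_seq_len) ∧
  arr_subtoken.length ≤ arr_start_end.length ∧
  arr_subtoken.length ≤ arr_word_id.length ∧
  (∀ l ∈ arr_labels, arr_subtoken.length ≤ l.length)
instance (arr_subtoken : List (List String)) (arr_start_end : List (List (Int × Int))) (arr_labels : List (List (List String))) (arr_word_id : List (List Int)) (max_seq_len : Int) : Decidable (Pre_fragment_greedy_data arr_subtoken arr_start_end arr_labels arr_word_id max_seq_len) := by unfold Pre_fragment_greedy_data; infer_instance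

def pvWitness_fragment_greedy_data : List (List String) × (List (List (Int × Int))) × List (List (List String)) × List (List Int) × Int :=
  ([["ab", "c"], ["d"]], [[(0, 2), (2, 3)], [(3, 4)]], [[["O", "B"], ["I"]]], [[0, 1], [2]], 2)

def Spec_fragment_greedy_data (arr_subtoken : List (List String)) (arr_start_end : List (List (Int × Int))) (arr_labels : List (List (List String))) (arr_word_id : List (List Int)) (max_seq_len : Int) (out : List (List String) × (List (List (Int × Int))) × List (List (List String)) × List (List Int)) : Prop := out = fragment_greedy_data_alt arr_subtoken arr_start_end arr_labels arr_word_id max_seq_len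
instance (arr_subtoken : List (List String)) (arr_start_end : List (List (Int × Int))) (arr_labels : List (List (List String))) (arr_word_id : List (List Int)) (max_seq_len : Int) (out : List (List String) × (List (List (Int × Int))) × List (List (List String)) × List (List Int)) : Decidable (Spec_fragment_greedy_data arr_subtoken arr_start_end arr_labels arr_word_id max_seq_len out) := by unfold Spec_fragment_greedy_data; infer_instance

-- ===== CLAIM (what is proved, stated in full; the proofs are below) =====
def Claim_equal_fragment_greedy_data : Prop := ∀ (arr_subtoken : List (List String)) (arr_start_end : List (List (Int × Int))) (arr_labels : List (List (List String))) (arr_word_id : List (List Int)) (max_seq_len : Int), Dom_fragment_greedy_data arr_subtoken arr_start_end arr_labels arr_word_id max_seq_len → Pre_fragment_greedy_data arr_subtoken arr_start_end arr_labels arr_word_id max_seq_len → Spec_fragment_greedy_data arr_subtoken arr_start_end arr_labels arr_word_id max_seq_len (fragment_greedy_data arr_subtoken arr_start_end arr_labels arr_word_id max_seq_len)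

-- ===== LEMMAS AND PROOFS =====

lemma pvExtendLast_append {α : Type} (xs : List (List α)) (x ys : List α) :
    pvExtendLast (xs ++ [x]) ys = xs ++ [x ++ ys] := by
  induction xs with
  | nil => rfl
  | cons a t ih =>
    cases t with
    | nil => rfl
    | cons b t' => simpa [pvExtendLast] using ih

lemma pvLastLen_append {α : Type} (xs : List (List α)) (x : List α) :
    pvLastLen (xs ++ [x]) = x.length := by
  induction xs with
  | nil => rfl
  | cons a t ih =>
    cases t with
    | nil => rfl
    | cons b t' => simpa [pvLastLen] using ih

lemma zipWith_map_left_self {α β : Type} (l : List α) (g : α → β) (f : β → α → β) :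
    List.zipWith f (l.map g) l = l.map (fun a => f (g a) a) := by
  induction l with
  | nil => rfl
  | cons a t ih => simp [ih]

-- the state of A's loop, as a function of the groups packed so far
def pvStOf (sub : List (List String)) (se : List (List (Int × Int))) (labs : List (List (List String))) (wid : List (List Int)) (gs : List (List Nat)) :
    List (List String) × (List (List (Int × Int))) × List (List (List String)) × List (List Int) :=
  (gs.map (pvPackWith sub), gs.map (pvPackWith se), labs.map (fun d => gs.map (pvPackWith d)), gs.map (pvPackWith wid))

-- abbreviation for A's loop body
def pvStepA (sub : List (List String)) (se : List (List (Int × Int))) (labs : List (List (List String))) (wid : List (List Int)) (max_seq_len : Int)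
    (st : List (List String) × (List (List (Int × Int))) × List (List (List String)) × List (List Int)) (i : Nat) :
    List (List String) × (List (List (Int × Int))) × List (List (List String)) × List (List Int) :=
  let cur := sub.getD i []
  let st :=
    if (pvLastLen st.1 : Int) + (cur.length : Int) > max_seq_len then
      (st.1 ++ [[]], st.2.1 ++ [[]], st.2.2.1.map (fun fl => fl ++ [[]]), st.2.2.2 ++ [[]])
    else st
  (pvExtendLast st.1 cur,
   pvExtendLast st.2.1 (se.getD i []),
   List.zipWith (fun fl d => pvExtendLast fl (d.getD i [])) st.2.2.1 labs,
   pvExtendLast st.2.2.2 (wid.getD i []))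

lemma pvPackWith_append {α : Type} (data : List (List α)) (g : List Nat) (i : Nat) :
    pvPackWith data (g ++ [i]) = pvPackWith data g ++ data.getD i [] := by
  simp [pvPackWith]

lemma pvExtendLast_append2 {α : Type} (xs : List (List α)) (d ys : List α) :
    pvExtendLast (xs ++ [d, []]) ys = xs ++ [d, ys] := by
  have := pvExtendLast_append (xs ++ [d]) [] ys
  simpa using this

lemma pvStepA_stOf (sub : List (List String)) (se : List (List (Int × Int))) (labs : List (List (List String))) (wid : List (List Int)) (max_seq_len : Int)
    (done : List (List Nat)) (g : List Nat) (i : Nat) :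
    pvStepA sub se labs wid max_seq_len (pvStOf sub se labs wid (done ++ [g])) i =
      if ((pvPackWith sub g).length : Int) + ((sub.getD i []).length : Int) > max_seq_len then
        pvStOf sub se labs wid ((done ++ [g]) ++ [[i]])
      else
        pvStOf sub se labs wid (done ++ [g ++ [i]]) := by
  by_cases h : ((pvPackWith sub g).length : Int) + ((sub.getD i []).length : Int) > max_seq_len
  · rw [if_pos h]
    simp only [pvStepA]
    simp only [pvStOf, List.map_append, List.map_cons, List.map_nil, pvLastLen_append]
    rw [if_pos h]
    refine Prod.ext ?_ (Prod.ext ?_ (Prod.ext ?_ ?_)) <;>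
      simp [List.map_map, zipWith_map_left_self, pvExtendLast_append2, pvPackWith]
  · rw [if_neg h]
    simp only [pvStepA]
    simp only [pvStOf, List.map_append, List.map_cons, List.map_nil, pvLastLen_append]
    rw [if_neg h]
    refine Prod.ext ?_ (Prod.ext ?_ (Prod.ext ?_ ?_)) <;>
      simp [zipWith_map_left_self, pvExtendLast_append, pvPackWith_append]

lemma pvLoop_main (sub : List (List String)) (se : List (List (Int × Int))) (labs : List (List (List String))) (wid : List (List Int)) (max_seq_len : Int) :
    ∀ (n s : Nat) (done : List (List Nat)) (curRev : List Nat),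
      n + s = sub.length →
      (List.range' s n).foldl (pvStepA sub se labs wid max_seq_len)
          (pvStOf sub se labs wid (done ++ [curRev.reverse])) =
        pvStOf sub se labs wid
          (done ++ pvPackGroups ((sub.map (fun x => (x.length : Int))).drop s) max_seq_len s
            ((pvPackWith sub curRev.reverse).length : Int) curRev) := by
  intro n
  induction n with
  | zero =>
    intro s done curRev h
    have hs : s = sub.length := by omega
    simp [hs, List.drop_eq_nil_of_le, pvPackGroups]
  | succ n ih =>
    intro s done curRev h
    have hslt : s < sub.length := by omega
    have hdrop : (sub.map (fun x => (x.length : Int))).drop s =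
        ((sub.getD s []).length : Int) :: (sub.map (fun x => (x.length : Int))).drop (s + 1) := by
      rw [List.drop_eq_getElem_cons (by simpa using hslt)]
      simp [hslt]
    rw [List.range'_succ, List.foldl_cons, pvStepA_stOf, hdrop, pvPackGroups]
    by_cases hc : ((pvPackWith sub curRev.reverse).length : Int) + ((sub.getD s []).length : Int) > max_seq_len
    · rw [if_pos hc, if_pos hc]
      have := ih (s + 1) (done ++ [curRev.reverse]) [s] (by omega)
      simp only [List.reverse_cons, List.reverse_nil, List.nil_append] at this ⊢
      rw [show done ++ [curRev.reverse] ++ [[s]] = (done ++ [curRev.reverse]) ++ [[s]] by simp] at *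
      rw [this]
      have hlen : ((pvPackWith sub [s]).length : Int) = ((sub.getD s []).length : Int) := by
        simp [pvPackWith]
      rw [hlen]
      simp
    · rw [if_neg hc, if_neg hc]
      have := ih (s + 1) done (s :: curRev) (by omega)
      simp only [List.reverse_cons] at this
      rw [this]
      have hlen : ((pvPackWith sub (curRev.reverse ++ [s])).length : Int) =
          ((pvPackWith sub curRev.reverse).length : Int) + ((sub.getD s []).length : Int) := by
        simp [pvPackWith_append]
      rw [hlen]

-- ===== VERDICT (by name: the statement is the Claim_ definition above) =====
theorem fragment_greedy_data_spec : Claim_equal_fragment_greedy_data := by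
  intro sub se labs wid max_seq_len _ _
  unfold Spec_fragment_greedy_data fragment_greedy_data fragment_greedy_data_alt
  have hinit : ([[]], [[]], labs.map (fun _ => ([[]] : List (List String))), ([[]] : List (List Int))) =
      pvStOf sub se labs wid ([] ++ [List.reverse []]) := by
    simp [pvStOf, pvPackWith]
  rw [hinit, List.range_eq_range']
  have := pvLoop_main sub se labs wid max_seq_len sub.length 0 [] [] (by omega)
  simp only [List.reverse_nil, List.drop_zero, List.nil_append] at this
  have h0 : ((pvPackWith sub ([] : List Nat)).length : Int) = 0 := by simp [pvPackWith]
  rw [h0] at this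
  exact this
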